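-- pv_equiv track=rewrite | github.com/kalpakkitukale/crack-the-code-app | tools/expand_words.py | break_into_phonograms
-- ===== SOURCE A (Python) =====
-- DIGRAPHS = ['SH','TH','CH','WH','PH','CK','NG','NK','GH','KN','WR','GN','DGE','TCH',
--             'EE','EA','OA','OI','OY','OU','OW','AU','AW','EW','OO','AI','AY','EI','EY',
--             'IE','UE','UI','AR','ER','IR','UR','OR','IGH','OUGH','AUGH','EIGH','QU',
--             'TI','CI','SI','SCI','ED']
--
-- def break_into_phonograms(word):
--     """Simple phonogram breakdown."""
--     result = []
--     w = word.upper()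
--     i = 0
--     while i < len(w):
--         matched = False
--         # Try longest digraphs first
--         for length in [4, 3, 2]:
--             if i + length <= len(w):
--                 chunk = w[i:i+length]
--                 if chunk in DIGRAPHS:
--                     result.append(chunk)
--                     i += length
--                     matched = True
--                     break
--         if not matched:
--             result.append(w[i])
--             i += 1
--     return result
-- ===== SOURCE B (Python) =====
-- DIGRAPHS = ['SH','TH','CH','WH','PH','CK','NG','NK','GH','KN','WR','GN','DGE','TCH',
--             'EE','EA','OA','OI','OY','OU','OW','AU','AW','EW','OO','AI','AY','EI','EY',
--             'IE','UE','UI','AR','ER','IR','UR','OR','IGH','OUGH','AUGH','EIGH','QU',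
--             'TI','CI','SI','SCI','ED']
--
-- def break_into_phonograms(word):
--     """Simple phonogram breakdown."""
--     w = word.upper()
--     n = len(w)
--     # pass 1: jump table — for EVERY position, the length of the longest digraph
--     # starting there (1 where none matches); matches of equal length are identical
--     # strings, so max over matched lengths is the greedy choice
--     step = [max((len(d) for d in DIGRAPHS if w.startswith(d, j)), default=1)
--             for j in range(n)]
--     # pass 2: follow the jumps, slicing out the chunks
--     out, i = [], 0
--     while i < n:
--         out.append(w[i:i + step[i]])
--         i += step[i]
--     return out
-- ===== Notes on version B (the rewrite author's own statement) =====
-- stated objective: alternative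
-- what changed: B replaces A's interleaved scan (which at the current position tries slice lengths 4/3/2 against the table and advances) by two staged passes: pass 1 builds a jump table giving, for every position independently, the length of the longest digraph starting there as a max over prefix-matching digraphs (default 1), and pass 2 merely follows the jumps slicing out chunks.
import Mathlib
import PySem

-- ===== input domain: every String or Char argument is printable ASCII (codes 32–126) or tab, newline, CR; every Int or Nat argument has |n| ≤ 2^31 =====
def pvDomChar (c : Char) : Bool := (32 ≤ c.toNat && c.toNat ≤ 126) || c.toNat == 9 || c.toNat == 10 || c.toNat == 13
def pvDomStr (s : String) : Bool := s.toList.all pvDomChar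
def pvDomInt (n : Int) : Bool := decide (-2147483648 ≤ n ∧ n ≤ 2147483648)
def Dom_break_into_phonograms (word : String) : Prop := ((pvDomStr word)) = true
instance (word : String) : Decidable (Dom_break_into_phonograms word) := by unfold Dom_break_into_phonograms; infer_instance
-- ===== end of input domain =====

-- B replaces A's interleaved try-lengths-4/3/2-and-advance scan by two staged passes:
-- a jump table of greedy chunk lengths for every position, then a walk following the jumps (alternative, same cost).


-- ===== PORT A =====
-- Python's list of digraph strings, on the code-point side (chunks are compared as strings).
def DIGRAPHS : List (List Char) :=
  ["SH".toList,"TH".toList,"CH".toList,"WH".toList,"PH".toList,"CK".toList,"NG".toList,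
   "NK".toList,"GH".toList,"KN".toList,"WR".toList,"GN".toList,"DGE".toList,"TCH".toList,
   "EE".toList,"EA".toList,"OA".toList,"OI".toList,"OY".toList,"OU".toList,"OW".toList,
   "AU".toList,"AW".toList,"EW".toList,"OO".toList,"AI".toList,"AY".toList,"EI".toList,
   "EY".toList,"IE".toList,"UE".toList,"UI".toList,"AR".toList,"ER".toList,"IR".toList,
   "UR".toList,"OR".toList,"IGH".toList,"OUGH".toList,"AUGH".toList,"EIGH".toList,
   "QU".toList,"TI".toList,"CI".toList,"SI".toList,"SCI".toList,"ED".toList]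

-- the while-loop of A; w[i:i+k] for 0 ≤ i is (w.drop i).take k (exact: PySem.List.slice_natCast_add);
-- the for-loop over [4, 3, 2] with break is the nested if-chain.
def aLoop (w : List Char) (i : Nat) : List String :=
  if h : i < w.length then
    if i + 4 ≤ w.length ∧ (w.drop i).take 4 ∈ DIGRAPHS then
      String.ofList ((w.drop i).take 4) :: aLoop w (i + 4)
    else if i + 3 ≤ w.length ∧ (w.drop i).take 3 ∈ DIGRAPHS then
      String.ofList ((w.drop i).take 3) :: aLoop w (i + 3)
    else if i + 2 ≤ w.length ∧ (w.drop i).take 2 ∈ DIGRAPHS then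
      String.ofList ((w.drop i).take 2) :: aLoop w (i + 2)
    else
      String.ofList [w[i]] :: aLoop w (i + 1)
  else []
  termination_by w.length - i

def break_into_phonograms (word : String) : List String :=
  aLoop (PySem.Chars.upper word.toList) 0     -- w = word.upper()

-- ===== PORT B =====
-- pass 1's per-position entry: max(len(d) for d in DIGRAPHS if w.startswith(d, j)), default=1;
-- w.startswith(d, j) for 0 ≤ j is startswith on the suffix w.drop j (exact).
def stepAt (w : List Char) (j : Nat) : Nat :=
  PySem.List.maxD
    ((DIGRAPHS.filter (fun d => PySem.Chars.startswith (w.drop j) d)).map List.length)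
    (fun x => x) 1

-- step = [ … for j in range(n)]  (indices of range(n) are the naturals 0..n-1)
def stepTable (w : List Char) : List Nat := (List.range w.length).map (stepAt w)

-- every digraph has length ≥ 2 (used only for bWalk's termination)
theorem digraph_two_le_length : ∀ d ∈ DIGRAPHS, 2 ≤ d.length := by decide

-- every jump-table read step[i] (default 1 out of range) is ≥ 1: cited by bWalk's decreasing_by
theorem stepTable_getD_pos (w : List Char) (i : Nat) : 1 ≤ (stepTable w).getD i 1 := by
  by_cases h : i < w.length
  · rw [stepTable, PySem.List.getD_map_range _ _ _ _ h, stepAt]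
    rcases hm : PySem.List.max?
        ((DIGRAPHS.filter (fun d => PySem.Chars.startswith (w.drop i) d)).map List.length)
        (fun x => x) with _ | m
    · simp [PySem.List.maxD, hm]
    · have hmem := PySem.List.max?_mem hm
      simp only [List.mem_map, List.mem_filter] at hmem
      obtain ⟨d, ⟨hd, _⟩, hlen⟩ := hmem
      have := digraph_two_le_length d hd
      simp [PySem.List.maxD, hm]
      omega
  · have : w.length ≤ i := by omega
    rw [stepTable]
    rw [List.getD_eq_getElem?_getD, List.getElem?_eq_none (by simpa using this)]
    rfl

-- pass 2 of B: the jump walk; w[i:i+k] is (w.drop i).take k (PySem.List.slice_natCast_add)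
def bWalk (w : List Char) (i : Nat) : List String :=
  if _h : i < w.length then
    String.ofList ((w.drop i).take ((stepTable w).getD i 1)) :: bWalk w (i + (stepTable w).getD i 1)
  else []
  termination_by w.length - i
  decreasing_by
    have := stepTable_getD_pos w i
    omega

def break_into_phonograms_alt (word : String) : List String :=
  bWalk (PySem.Chars.upper word.toList) 0

-- ===== PRECONDITION & SPEC =====
def Spec_break_into_phonograms (word : String) (out : List String) : Prop := out = break_into_phonograms_alt word
instance (word : String) (out : List String) : Decidable (Spec_break_into_phonograms word out) := by unfold Spec_break_into_phonograms; infer_instance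

-- ===== CLAIM (what is proved, stated in full; the proofs are below) =====
def Claim_equal_break_into_phonograms : Prop := ∀ (word : String), Dom_break_into_phonograms word → Spec_break_into_phonograms word (break_into_phonograms word)

-- ===== LEMMAS AND PROOFS =====

-- every digraph length is 2, 3 or 4
theorem digraph_length_cases : ∀ d ∈ DIGRAPHS, d.length = 2 ∨ d.length = 3 ∨ d.length = 4 := by decide

-- membership of κ in the matched-lengths list ↔ A's condition for chunk length κ
theorem mem_lengths_iff (w : List Char) (i κ : Nat) (hκ : 0 < κ) :
    κ ∈ (DIGRAPHS.filter (fun d => PySem.Chars.startswith (w.drop i) d)).map List.length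
      ↔ (i + κ ≤ w.length ∧ (w.drop i).take κ ∈ DIGRAPHS) := by
  simp only [List.mem_map, List.mem_filter, PySem.Chars.startswith_iff]
  constructor
  · rintro ⟨d, ⟨hd, hpre⟩, hlen⟩
    have htake : d = (w.drop i).take κ := by
      have := List.prefix_iff_eq_take.mp hpre
      rw [← hlen]; exact this
    have hle : κ ≤ (w.drop i).length := by
      have := hpre.length_le
      omega
    rw [List.length_drop] at hle
    exact ⟨by omega, htake ▸ hd⟩
  · rintro ⟨hle, hmem⟩
    refine ⟨(w.drop i).take κ, ⟨hmem, List.take_prefix κ _⟩, ?_⟩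
    simp only [List.length_take, List.length_drop]
    omega

-- the jump-table entry is exactly A's greedy choice of chunk length
theorem stepAt_eq (w : List Char) (i : Nat) :
    stepAt w i =
      if i + 4 ≤ w.length ∧ (w.drop i).take 4 ∈ DIGRAPHS then 4
      else if i + 3 ≤ w.length ∧ (w.drop i).take 3 ∈ DIGRAPHS then 3
      else if i + 2 ≤ w.length ∧ (w.drop i).take 2 ∈ DIGRAPHS then 2
      else 1 := by
  rw [stepAt]
  set L := (DIGRAPHS.filter (fun d => PySem.Chars.startswith (w.drop i) d)).map List.length with hL
  have hsub : ∀ κ ∈ L, κ = 2 ∨ κ = 3 ∨ κ = 4 := by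
    intro κ hκ
    simp only [hL, List.mem_map, List.mem_filter] at hκ
    obtain ⟨d, ⟨hd, _⟩, hlen⟩ := hκ
    rcases digraph_length_cases d hd with h | h | h <;> omega
  rcases hm : PySem.List.max? L (fun x => x) with _ | m
  · -- no digraph matches at i: every condition is false
    have hnil := (PySem.List.max?_eq_none_iff L (fun x => x)).mp hm
    have h4 := (mem_lengths_iff w i 4 (by omega)).not.mp (by rw [← hL, hnil]; simp)
    have h3 := (mem_lengths_iff w i 3 (by omega)).not.mp (by rw [← hL, hnil]; simp)
    have h2 := (mem_lengths_iff w i 2 (by omega)).not.mp (by rw [← hL, hnil]; simp)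
    rw [if_neg h4, if_neg h3, if_neg h2]
    simp [PySem.List.maxD, hm]
  · have hmem : m ∈ L := PySem.List.max?_mem hm
    have hmax : ∀ y ∈ L, y ≤ m := fun y hy => PySem.List.max?_isMax hm y hy
    have hval : PySem.List.maxD L (fun x => x) 1 = m := by simp [PySem.List.maxD, hm]
    rw [hval]
    by_cases h4 : i + 4 ≤ w.length ∧ (w.drop i).take 4 ∈ DIGRAPHS
    · have h4L : (4 : Nat) ∈ L := hL ▸ (mem_lengths_iff w i 4 (by omega)).mpr h4
      have := hmax 4 h4L
      rcases hsub m hmem with h | h | h <;> rw [if_pos h4] <;> omega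
    · have h4L : (4 : Nat) ∉ L := fun hc => h4 ((mem_lengths_iff w i 4 (by omega)).mp (hL ▸ hc))
      rw [if_neg h4]
      by_cases h3 : i + 3 ≤ w.length ∧ (w.drop i).take 3 ∈ DIGRAPHS
      · have h3L : (3 : Nat) ∈ L := hL ▸ (mem_lengths_iff w i 3 (by omega)).mpr h3
        have := hmax 3 h3L
        rcases hsub m hmem with h | h | h
        · omega
        · rw [if_pos h3]; omega
        · exact absurd (h ▸ hmem) h4L
      · have h3L : (3 : Nat) ∉ L := fun hc => h3 ((mem_lengths_iff w i 3 (by omega)).mp (hL ▸ hc))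
        rw [if_neg h3]
        by_cases h2 : i + 2 ≤ w.length ∧ (w.drop i).take 2 ∈ DIGRAPHS
        · rw [if_pos h2]
          rcases hsub m hmem with h | h | h
          · omega
          · exact absurd (h ▸ hmem) h3L
          · exact absurd (h ▸ hmem) h4L
        · have h2L : (2 : Nat) ∉ L := fun hc => h2 ((mem_lengths_iff w i 2 (by omega)).mp (hL ▸ hc))
          rcases hsub m hmem with h | h | h
          · exact absurd (h ▸ hmem) h2L
          · exact absurd (h ▸ hmem) h3L
          · exact absurd (h ▸ hmem) h4L

theorem loops_eq (w : List Char) : ∀ i, aLoop w i = bWalk w i := by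
  intro i
  induction hn : w.length - i using Nat.strong_induction_on generalizing i with
  | _ n ih =>
  subst hn
  by_cases h : i < w.length
  · rw [aLoop, bWalk]
    simp only [dif_pos h]
    have hstep : (stepTable w).getD i 1 = stepAt w i :=
      PySem.List.getD_map_range (stepAt w) w.length i 1 h
    rw [hstep, stepAt_eq]
    by_cases h4 : i + 4 ≤ w.length ∧ (w.drop i).take 4 ∈ DIGRAPHS
    · rw [if_pos h4, if_pos h4]
      exact congrArg _ (ih _ (by omega) (i + 4) rfl)
    · rw [if_neg h4, if_neg h4]
      by_cases h3 : i + 3 ≤ w.length ∧ (w.drop i).take 3 ∈ DIGRAPHS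
      · rw [if_pos h3, if_pos h3]
        exact congrArg _ (ih _ (by omega) (i + 3) rfl)
      · rw [if_neg h3, if_neg h3]
        by_cases h2 : i + 2 ≤ w.length ∧ (w.drop i).take 2 ∈ DIGRAPHS
        · rw [if_pos h2, if_pos h2]
          exact congrArg _ (ih _ (by omega) (i + 2) rfl)
        · rw [if_neg h2, if_neg h2]
          have htake : (w.drop i).take 1 = [w[i]] := by
            rw [List.drop_eq_getElem_cons h]
            rfl
          rw [htake]
          exact congrArg _ (ih _ (by omega) (i + 1) rfl)
  · rw [aLoop, bWalk]
    simp [h]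

-- ===== VERDICT (by name: the statement is the Claim_ definition above) =====
theorem break_into_phonograms_spec : Claim_equal_break_into_phonograms := by
  intro word _
  unfold Spec_break_into_phonograms break_into_phonograms break_into_phonograms_alt
  exact loops_eq _ 0
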